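-- pv_equiv track=rewrite | github.com/shiva-aditya/codemind-python | Common_words_-2.py | po
-- ===== SOURCE A (Python) =====
-- def po(a,b):
--     r=set(a)
--     y=set(b)
--     q=list(r&y)
--     c=0
--     for i in q:
--         if a.count(i)==b.count(i):
--             c+=1
--     return c
-- ===== SOURCE B (Python) =====
-- def po(a, b):
--     ca = {}
--     for ch in a:
--         ca[ch] = ca.get(ch, 0) + 1
--     cb = {}
--     for ch in b:
--         cb[ch] = cb.get(ch, 0) + 1
--     return len(set(ca.items()) & set(cb.items()))
-- ===== Notes on version B (the rewrite author's own statement) =====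
-- stated objective: alternative
-- what changed: B replaces A's loop over the common characters with its per-element a.count/b.count rescans by two single-pass count tables whose answer is the size of the set intersection of their (char, count) item views, with no per-key comparison loop or branch.
import Mathlib
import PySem

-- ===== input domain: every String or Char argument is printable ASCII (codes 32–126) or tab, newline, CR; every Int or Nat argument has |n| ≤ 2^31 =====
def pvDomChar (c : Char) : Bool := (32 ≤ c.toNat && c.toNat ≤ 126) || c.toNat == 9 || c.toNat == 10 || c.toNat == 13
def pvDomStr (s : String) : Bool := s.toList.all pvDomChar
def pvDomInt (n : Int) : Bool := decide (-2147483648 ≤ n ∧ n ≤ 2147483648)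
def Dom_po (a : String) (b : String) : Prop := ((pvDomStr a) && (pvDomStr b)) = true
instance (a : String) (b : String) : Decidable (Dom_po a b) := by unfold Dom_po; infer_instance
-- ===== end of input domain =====

-- B builds a count table for each string and returns the size of the set
-- intersection of their (char, count) item views, replacing A's per-element
-- count-and-compare loop over the common characters (objective: alternative).

-- ===== PORT A =====
-- a.count(i) for a one-character string i equals the count of that character:
-- ported as List.count on the character lists (exact on chars).
def po (a : String) (b : String) : Int :=
  let r : PySem.Set Char := PySem.Set.ofList a.toList
  let y : PySem.Set Char := PySem.Set.ofList b.toList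
  let q : List Char := PySem.Set.inter r y
  q.foldl (fun c i =>
    if PySem.List.count a.toList i == PySem.List.count b.toList i then c + 1 else c) 0

-- ===== PORT B =====
def po_alt (a : String) (b : String) : Int :=
  let ca : PySem.Dict Char Int :=
    a.toList.foldl (fun d ch => d.insert ch (d.getD ch 0 + 1)) PySem.Dict.empty
  let cb : PySem.Dict Char Int :=
    b.toList.foldl (fun d ch => d.insert ch (d.getD ch 0 + 1)) PySem.Dict.empty
  PySem.Set.len (PySem.Set.inter (PySem.Set.ofList ca.items) (PySem.Set.ofList cb.items))

-- ===== PRECONDITION & SPEC =====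
def Spec_po (a : String) (b : String) (out : Int) : Prop := out = po_alt a b
instance (a : String) (b : String) (out : Int) : Decidable (Spec_po a b out) := by unfold Spec_po; infer_instance

-- ===== CLAIM (what is proved, stated in full; the proofs are below) =====
def Claim_equal_po : Prop := ∀ (a : String) (b : String), Dom_po a b → Spec_po a b (po a b)

-- ===== LEMMAS AND PROOFS =====

-- the items list of Counter(xs) has no duplicates (its keys are distinct)
theorem pv_items_nodup (xs : List Char) :
    ((PySem.Set.ofList xs).map (fun k => (k, (xs.count k : Int)))).Nodup :=
  (PySem.Set.nodup_ofList (xs := xs)).map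
    (fun {_ _} h => congrArg Prod.fst h)

-- membership of a pair in Counter(ys).items
theorem pv_mem_items (ys : List Char) (k : Char) (v : Int) :
    ((k, v) ∈ (PySem.Set.ofList ys).map (fun k => (k, (ys.count k : Int)))) ↔
      (k ∈ ys ∧ v = (ys.count k : Int)) := by
  constructor
  · rintro h
    rcases List.mem_map.1 h with ⟨k', hk', hkv⟩
    cases hkv
    exact ⟨(PySem.Set.mem_ofList _ _).1 hk', rfl⟩
  · rintro ⟨hk, rfl⟩
    exact List.mem_map.2 ⟨k, (PySem.Set.mem_ofList _ _).2 hk, rfl⟩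

-- both sides are the same countP over set(a)
theorem pv_main (a b : String) : po a b = po_alt a b := by
  have h1 : po a b = List.foldl
      (fun c i => if PySem.List.count a.toList i == PySem.List.count b.toList i
        then c + 1 else c) 0
      (PySem.Set.inter (PySem.Set.ofList a.toList) (PySem.Set.ofList b.toList)) := rfl
  have h2 : po_alt a b = PySem.Set.len (PySem.Set.inter
      (PySem.Set.ofList (PySem.Dict.counter a.toList).items)
      (PySem.Set.ofList (PySem.Dict.counter b.toList).items)) := by
    unfold po_alt
    rw [PySem.Dict.foldl_insert_getD_add_one_eq_counter,
        PySem.Dict.foldl_insert_getD_add_one_eq_counter]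
  rw [h1, h2, PySem.Dict.items_counter, PySem.Dict.items_counter,
      PySem.Set.ofList_eq_self_of_nodup _ (pv_items_nodup a.toList),
      PySem.Set.ofList_eq_self_of_nodup _ (pv_items_nodup b.toList),
      PySem.List.foldl_if_add_one]
  simp only [PySem.Set.inter, PySem.Set.len, List.countP_filter,
    ← List.countP_eq_length_filter, List.countP_map, zero_add]
  refine congrArg Nat.cast (List.countP_congr ?_)
  intro k hk
  simp only [Function.comp_apply, PySem.List.count_eq]
  rw [Bool.and_eq_true, beq_iff_eq, PySem.Set.contains_iff,
    PySem.Set.contains_iff, pv_mem_items, PySem.Set.mem_ofList]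
  constructor
  · rintro ⟨h1, h2⟩; exact ⟨h2, by exact_mod_cast h1⟩
  · rintro ⟨h1, h2⟩; exact ⟨by exact_mod_cast h2, h1⟩

-- ===== VERDICT (by name: the statement is the Claim_ definition above) =====
theorem po_spec : Claim_equal_po := by
  intro a b _
  unfold Spec_po
  exact pv_main a b
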